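-- pv_equiv track=rewrite | github.com/Sulaimanovuran/MacBoochnaya | tests.py | create_merged_dict
-- ===== SOURCE A (Python) =====
-- def create_merged_dict(list_of_dicts, need_list):
--     merged_dict = {}
--     counter = 0
--     for d in list_of_dicts:
--         for key, value in d.items():
--             if key not in merged_dict and key in need_list:
--                 merged_dict[key] = [value]
--             else:
--                 if key in need_list:
--                     merged_dict[key].append(value)
--                     counter +=1
--     need_macs_data = []
--
--     for desc, prices in merged_dict.items():
--         for prc in prices:
--             if len(prc) > 2:
--                 prc = [f'=HYPERLINK("{prc[2]}", "{prc[0]}")', f'=HYPERLINK("{prc[2]}", "{prc[1]}")']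
--
--     for key, value in merged_dict.items():
--         need_macs_data.append([key] + [price for price in value])
--     return need_macs_data
-- ===== SOURCE B (Python) =====
-- def create_merged_dict(list_of_dicts, need_list):
--     # group-by-key: index the needed keys in first-appearance order, then
--     # build each row by rescanning the dicts for that key
--     keys = []
--     seen = set()
--     for d in list_of_dicts:
--         for key in d:
--             if key in need_list and key not in seen:
--                 seen.add(key)
--                 keys.append(key)
--     return [[key] + [d[key] for d in list_of_dicts if key in d] for key in keys]
-- ===== Notes on version B (the rewrite author's own statement) =====
-- stated objective: alternative
-- what changed: A builds the whole result in one accumulating dict pass (insert-or-append per entry, plus a dead middle loop and an unused counter); B first indexes the needed keys in first-appearance order with a seen-set, then builds each row by rescanning the dicts for that key (group-by-key, O(keys*dicts) rescans instead of one accumulating pass).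
import Mathlib
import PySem

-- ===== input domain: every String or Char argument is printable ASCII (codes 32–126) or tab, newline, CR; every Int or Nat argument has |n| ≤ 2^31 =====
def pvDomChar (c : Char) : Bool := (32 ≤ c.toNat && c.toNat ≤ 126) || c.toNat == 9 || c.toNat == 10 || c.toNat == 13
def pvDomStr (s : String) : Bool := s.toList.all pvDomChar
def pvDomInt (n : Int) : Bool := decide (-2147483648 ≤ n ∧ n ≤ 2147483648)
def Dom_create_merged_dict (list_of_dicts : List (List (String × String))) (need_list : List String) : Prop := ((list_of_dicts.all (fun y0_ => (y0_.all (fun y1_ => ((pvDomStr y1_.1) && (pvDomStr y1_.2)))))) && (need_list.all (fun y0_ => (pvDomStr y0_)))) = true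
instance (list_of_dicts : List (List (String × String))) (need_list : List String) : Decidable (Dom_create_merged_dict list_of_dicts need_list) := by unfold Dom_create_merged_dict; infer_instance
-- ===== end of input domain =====

-- B replaces A's single accumulating dict pass by an index-then-rescan group-by (collect the needed
-- keys in first-appearance order, then rebuild each row by scanning the dicts); objective: alternative.

-- ===== PORT A =====
def create_merged_dict (list_of_dicts : List (List (String × String))) (need_list : List String) : List (List String) :=
  (list_of_dicts.foldl (fun m d =>
      d.foldl (fun m kv =>
        if !(m.contains kv.1) && need_list.contains kv.1 then
          m.insert kv.1 [kv.2]
        else if need_list.contains kv.1 then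
          -- merged_dict[key].append(value); the branch guarantees the key is present
          m.modify kv.1 [] (fun ps => ps ++ [kv.2])
        else m) m) (PySem.Dict.empty : PySem.Dict String (List String))).items.map
    (fun p => p.1 :: p.2.map (fun price => price))
  -- A's middle 'for desc, prices' loop only rebinds the local name prc and never writes back:
  -- it has no observable effect, so it contributes nothing here (the counter is unused too)

-- ===== PORT B =====
def create_merged_dict_alt (list_of_dicts : List (List (String × String))) (need_list : List String) : List (List String) :=
  ((list_of_dicts.foldl (fun st d =>
      d.foldl (fun st kv =>
        if need_list.contains kv.1 && !(PySem.Set.contains st.1 kv.1) then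
          (PySem.Set.add st.1 kv.1, st.2 ++ [kv.1])
        else st) st) ((PySem.Set.empty : PySem.Set String), ([] : List String))).2).map (fun k => k :: list_of_dicts.filterMap (fun d => (d.find? (fun kv => kv.1 == k)).map Prod.snd))

-- ===== PRECONDITION & SPEC =====
-- Pre_ excludes association lists with a duplicated key inside one dict: such a list does not represent
-- a Python dict (a dict collapses duplicate keys before A ever sees them), so the corner is unrepresentable
-- on the Python side and each port's reading of it is accidental.
def Pre_create_merged_dict (list_of_dicts : List (List (String × String))) (_need_list : List String) : Prop :=
  ∀ d ∈ list_of_dicts, (d.map Prod.fst).Nodup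
instance (list_of_dicts : List (List (String × String))) (need_list : List String) : Decidable (Pre_create_merged_dict list_of_dicts need_list) := by unfold Pre_create_merged_dict; infer_instance

def pvWitness_create_merged_dict : (List (List (String × String))) × List String :=
  ([[("a", "1"), ("b", "2")], [("a", "3")]], ["a", "b"])

def Spec_create_merged_dict (list_of_dicts : List (List (String × String))) (need_list : List String) (out : List (List String)) : Prop := out = create_merged_dict_alt list_of_dicts need_list
instance (list_of_dicts : List (List (String × String))) (need_list : List String) (out : List (List String)) : Decidable (Spec_create_merged_dict list_of_dicts need_list out) := by unfold Spec_create_merged_dict; infer_instance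

-- ===== CLAIM (what is proved, stated in full; the proofs are below) =====
def Claim_equal_create_merged_dict : Prop := ∀ (list_of_dicts : List (List (String × String))) (need_list : List String), Dom_create_merged_dict list_of_dicts need_list → Pre_create_merged_dict list_of_dicts need_list → Spec_create_merged_dict list_of_dicts need_list (create_merged_dict list_of_dicts need_list)

-- ===== LEMMAS AND PROOFS =====

-- A's dict-building step collapses to one unconditional 'modify' when the key is needed
lemma stepA_eq (need_list : List String) (m : PySem.Dict String (List String)) (kv : String × String) :
    (if !(m.contains kv.1) && need_list.contains kv.1 then
      m.insert kv.1 [kv.2]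
    else if need_list.contains kv.1 then
      m.modify kv.1 [] (fun ps => ps ++ [kv.2])
    else m)
    = if need_list.contains kv.1 then m.modify kv.1 [] (fun ps => ps ++ [kv.2]) else m := by
  by_cases hn : need_list.contains kv.1 = true
  · by_cases hc : m.contains kv.1 = true
    · rw [if_neg (by rw [hc]; simp), if_pos hn]
    · have hg : m.getD kv.1 [] = [] :=
        PySem.Dict.getD_of_not_contains m [] (Bool.eq_false_iff.mpr hc)
      rw [if_pos (by rw [hn, Bool.eq_false_iff.mpr hc]; rfl), if_pos hn]
      simp [PySem.Dict.modify, hg]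
  · have hn' : need_list.contains kv.1 = false := Bool.eq_false_iff.mpr hn
    rw [if_neg (by rw [hn']; simp), if_neg hn]

-- per-dict with unique keys, the first match is the only match
lemma filter_eq_find (d : List (String × String)) (k : String) (h : (d.map Prod.fst).Nodup) :
    (d.filter (fun p => p.1 == k)).map Prod.snd
      = ((d.find? (fun kv => kv.1 == k)).map Prod.snd).toList := by
  induction d with
  | nil => simp
  | cons a t ih =>
    simp only [List.map_cons, List.nodup_cons] at h
    by_cases ha : a.1 == k
    · have hak : a.1 = k := eq_of_beq ha
      have : t.filter (fun p => p.1 == k) = [] := by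
        rw [List.filter_eq_nil_iff]
        intro p hp hpk
        exact h.1 (by rw [hak, ← eq_of_beq hpk]; exact List.mem_map_of_mem hp)
      simp [ha, this]
    · simp [ha, ih h.2]

-- B's rescan of the dict list equals the flattened filter of all pairs with that key
lemma row_eq (lod : List (List (String × String))) (k : String)
    (h : ∀ d ∈ lod, (d.map Prod.fst).Nodup) :
    lod.filterMap (fun d => (d.find? (fun kv => kv.1 == k)).map Prod.snd)
      = (lod.flatten.filter (fun p => p.1 == k)).map Prod.snd := by
  induction lod with
  | nil => simp
  | cons d t ih =>
    have hd := h d (by simp)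
    have ht := ih (fun d' hd' => h d' (by simp [hd']))
    rw [List.flatten_cons, List.filter_append, List.map_append, ← ht,
      filter_eq_find d k hd, List.filterMap_cons]
    cases (d.find? (fun kv => kv.1 == k)).map Prod.snd <;> simp

-- B's seen/keys pair stays duplicated: the fold from (s, s) is the Set fold, twice
lemma bfold_eq (need_list : List String) (l : List (String × String)) (s : PySem.Set String) :
    l.foldl (fun st kv =>
        if need_list.contains kv.1 && !(PySem.Set.contains st.1 kv.1) then
          (PySem.Set.add st.1 kv.1, st.2 ++ [kv.1])
        else st) (s, s)
      = (l.foldl (fun s kv => if need_list.contains kv.1 then PySem.Set.add s kv.1 else s) s,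
         l.foldl (fun s kv => if need_list.contains kv.1 then PySem.Set.add s kv.1 else s) s) := by
  induction l generalizing s with
  | nil => rfl
  | cons kv t ih =>
    rw [List.foldl_cons, List.foldl_cons]
    dsimp only
    by_cases hn : need_list.contains kv.1 = true
    · by_cases hm : kv.1 ∈ s
      · have hc : PySem.Set.contains s kv.1 = true := (PySem.Set.contains_iff s kv.1).mpr hm
        rw [if_neg (by rw [hn, hc]; simp), if_pos hn, PySem.Set.add_of_mem hm]
        exact ih s
      · have hc : PySem.Set.contains s kv.1 = false := by
          simpa using fun h => hm ((PySem.Set.contains_iff s kv.1).mp h)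
        rw [if_pos (by rw [hn, hc]; rfl), if_pos hn, PySem.Set.add_of_not_mem hm]
        exact ih (s ++ [kv.1])
    · have hn' : need_list.contains kv.1 = false := Bool.eq_false_iff.mpr hn
      rw [if_neg (by rw [hn']; simp), if_neg hn]
      exact ih s

-- the two key orders coincide: first-appearance dedup of the needed keys
lemma keys_agree (lod : List (List (String × String))) (need_list : List String) :
    (lod.foldl (fun st d =>
        d.foldl (fun st kv =>
          if need_list.contains kv.1 && !(PySem.Set.contains st.1 kv.1) then
            (PySem.Set.add st.1 kv.1, st.2 ++ [kv.1])
          else st) st) (PySem.Set.empty, [])).2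
      = PySem.Set.ofList (((lod.flatten.filter (fun p => need_list.contains p.1)).map Prod.fst)) := by
  rw [← List.foldl_flatten,
    show ((PySem.Set.empty : PySem.Set String), ([] : List String))
      = ((PySem.Set.empty : PySem.Set String), (PySem.Set.empty : PySem.Set String)) from rfl,
    bfold_eq need_list lod.flatten PySem.Set.empty]
  dsimp only
  simp only [← List.foldl_filter (p := fun kv : String × String => need_list.contains kv.1)]
  rw [← PySem.Set.update_map_eq_foldl_add]
  exact PySem.Set.update_nil_left _

theorem create_merged_dict_spec : Claim_equal_create_merged_dict := by
  intro lod need _ hpre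
  unfold Spec_create_merged_dict create_merged_dict create_merged_dict_alt
  -- rewrite A's dict build into the canonical modify-fold over the filtered flattened pairs
  have hstep : (fun (m : PySem.Dict String (List String)) (kv : String × String) =>
      if !(m.contains kv.1) && need.contains kv.1 then m.insert kv.1 [kv.2]
      else if need.contains kv.1 then m.modify kv.1 [] (fun ps => ps ++ [kv.2])
      else m)
      = fun m kv => if need.contains kv.1 then m.modify kv.1 [] (fun ps => ps ++ [kv.2]) else m := by
    funext m kv; exact stepA_eq need m kv
  rw [← List.foldl_flatten, hstep,
    ← List.foldl_filter (p := fun kv : String × String => need.contains kv.1)]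
  set F := lod.flatten.filter (fun p => need.contains p.1) with hF
  set M := F.foldl (fun (d : PySem.Dict String (List String)) p =>
      d.modify p.1 [] (fun ps => ps ++ [p.2])) PySem.Dict.empty with hM
  have hnd : M.keys.Nodup := by
    rw [hM]
    exact PySem.Dict.nodup_keys_foldl_modify_key F Prod.fst [] (fun d p => (· ++ [p.2]))
      PySem.Dict.empty (by simp)
  have hkeys : M.keys = PySem.Set.ofList (F.map Prod.fst) := by
    rw [hM, PySem.Dict.keys_foldl_modify_key]
    simp [PySem.Dict.keys_empty, PySem.Set.update_nil_left]
  have hitems := PySem.Dict.items_eq_map_keys M hnd ([] : List String)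
  rw [hitems, keys_agree lod need, ← hF, ← hkeys]
  rw [List.map_map]
  apply List.map_congr_left
  intro k hk
  simp only [Function.comp]
  congr 1
  -- the row for k: A's accumulated list = B's rescan
  have hget : M.getD k [] = (F.filter (fun p => p.1 == k)).map Prod.snd := by
    rw [hM]
    simpa using PySem.Dict.getD_foldl_modify_append F PySem.Dict.empty k
  have hkneed : need.contains k = true := by
    rw [hkeys] at hk
    have : k ∈ F.map Prod.fst := (PySem.Set.mem_ofList _ _).mp hk
    obtain ⟨p, hp, hpk⟩ := List.mem_map.mp this
    rw [hF, List.mem_filter] at hp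
    rw [← hpk]; exact hp.2
  have hFfilter : F.filter (fun p => p.1 == k) = lod.flatten.filter (fun p => p.1 == k) := by
    rw [hF, List.filter_filter]
    apply List.filter_congr
    intro p _
    by_cases hpk : p.1 == k
    · have hk1 : p.1 = k := eq_of_beq hpk
      have hmem : k ∈ need := by simpa using hkneed
      simp [hk1, hmem]
    · simp [hpk]
  rw [hget, hFfilter, row_eq lod k hpre]
  simp
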